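-- pv_equiv track=rewrite | github.com/EMJzero/FactorFlow | utils.py | single_cyclic_shift
-- ===== SOURCE A (Python) =====
-- def single_cyclic_shift(arr1, arr2):
--     n = len(arr1)
--     for i in range(n):
--         # Right Shift
--         if arr1[-1] == arr2[i] and arr1[:-1] == arr2[i+1:]:
--             return [[arr1[-1]], arr1[:-1]]
--         # Left Shift
--         if arr1[0] == arr2[i] and arr1[1:] == arr2[:i]:
--             return [[arr2[i]], arr1[1:]]
--     return []
-- ===== SOURCE B (Python) =====
-- def single_cyclic_shift(arr1, arr2):
--     # By slice lengths, a right-shift match is only possible at loop index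
--     # m - n and a left-shift match only at n - 1, so compare one rotation of
--     # arr1 against the corresponding block of arr2 instead of scanning.
--     n, m = len(arr1), len(arr2)
--     if n == 0 or m < n:
--         return []
--     if 2 * n > m:
--         rot = arr1[-1:] + arr1[:-1]  # arr1 rotated right once
--         if arr2[m - n:] == rot:
--             return [rot[:1], rot[1:]]
--     lrot = arr1[1:] + arr1[:1]  # arr1 rotated left once
--     if arr2[:n] == lrot:
--         return [[arr1[0]], arr1[1:]]
--     return []
-- ===== Notes on version B (the rewrite author's own statement) =====
-- stated objective: alternative
-- what changed: A scans all n loop indices checking the two shift conditions at each; B observes that by slice lengths a right-shift match is only possible at i = len(arr2)-len(arr1) and a left-shift match only at i = len(arr1)-1, and compares one rotation of arr1 against the corresponding block of arr2 (worst-case O(n) vs A's O(n^2), but A's scalar short-circuit makes the two comparable on random inputs, so no speed is claimed).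
import Mathlib
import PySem

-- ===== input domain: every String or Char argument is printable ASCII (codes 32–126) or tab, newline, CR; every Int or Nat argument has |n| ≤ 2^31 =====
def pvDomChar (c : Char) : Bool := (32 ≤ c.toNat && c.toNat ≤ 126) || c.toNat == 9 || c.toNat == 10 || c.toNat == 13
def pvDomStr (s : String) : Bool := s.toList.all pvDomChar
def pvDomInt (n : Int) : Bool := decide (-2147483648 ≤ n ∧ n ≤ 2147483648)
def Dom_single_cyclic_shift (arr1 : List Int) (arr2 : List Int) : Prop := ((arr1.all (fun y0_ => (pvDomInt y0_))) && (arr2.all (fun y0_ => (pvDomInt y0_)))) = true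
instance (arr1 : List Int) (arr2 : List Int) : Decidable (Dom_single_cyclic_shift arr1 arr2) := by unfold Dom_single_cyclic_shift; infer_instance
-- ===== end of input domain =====

-- B replaces A's index scan by direct checks of the only two loop indices a
-- match is possible at, via one rotation of arr1 (objective: alternative).

-- ===== PORT A =====
-- the for-loop with early return; pyGetD is the total indexing form, exact under
-- Pre_ (arr2[i] is in range for every index the loop reaches before returning)
def sscGoA (arr1 arr2 : List Int) : List Int → List (List Int)
  | [] => []
  | i :: rest =>
    if PySem.List.pyGetD arr1 (-1) 0 = PySem.List.pyGetD arr2 i 0 ∧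
        PySem.List.slice arr1 none (some (-1)) = PySem.List.slice arr2 (some (i + 1)) none then
      [[PySem.List.pyGetD arr1 (-1) 0], PySem.List.slice arr1 none (some (-1))]
    else if PySem.List.pyGetD arr1 0 0 = PySem.List.pyGetD arr2 i 0 ∧
        PySem.List.slice arr1 (some 1) none = PySem.List.slice arr2 none (some i) then
      [[PySem.List.pyGetD arr2 i 0], PySem.List.slice arr1 (some 1) none]
    else sscGoA arr1 arr2 rest

def single_cyclic_shift (arr1 : List Int) (arr2 : List Int) : List (List Int) :=
  sscGoA arr1 arr2 (PySem.List.pyRange 0 arr1.length 1)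

-- ===== PORT B =====
def single_cyclic_shift_alt (arr1 : List Int) (arr2 : List Int) : List (List Int) :=
  match arr1 with
  | [] => []  -- n == 0
  | h :: t =>
    let n := t.length + 1
    let m := arr2.length
    if m < n then []
    else
      -- arr1[-1:] + arr1[:-1] and arr1[1:] + arr1[:1]: the two rotations of arr1
      let rot := t.getLastD h :: (h :: t).dropLast
      let lrot := t ++ [h]
      if 2 * n > m ∧ arr2.drop (m - n) = rot then [rot.take 1, rot.drop 1]
      else if arr2.take n = lrot then [[h], t]
      else []

-- ===== PRECONDITION & SPEC =====
-- Pre_ excludes exactly the inputs where A raises IndexError (arr2[i] with arr2 shorter than nonempty arr1).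
def Pre_single_cyclic_shift (arr1 : List Int) (arr2 : List Int) : Prop :=
  arr1 = [] ∨ arr1.length ≤ arr2.length
instance (arr1 : List Int) (arr2 : List Int) : Decidable (Pre_single_cyclic_shift arr1 arr2) := by unfold Pre_single_cyclic_shift; infer_instance
def pvWitness_single_cyclic_shift : List Int × List Int := ([1, 2], [2, 1])

def Spec_single_cyclic_shift (arr1 : List Int) (arr2 : List Int) (out : List (List Int)) : Prop := out = single_cyclic_shift_alt arr1 arr2
instance (arr1 : List Int) (arr2 : List Int) (out : List (List Int)) : Decidable (Spec_single_cyclic_shift arr1 arr2 out) := by unfold Spec_single_cyclic_shift; infer_instance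

-- ===== CLAIM (what is proved, stated in full; the proofs are below) =====
def Claim_equal_single_cyclic_shift : Prop := ∀ (arr1 : List Int) (arr2 : List Int), Dom_single_cyclic_shift arr1 arr2 → Pre_single_cyclic_shift arr1 arr2 → Spec_single_cyclic_shift arr1 arr2 (single_cyclic_shift arr1 arr2)
-- ===== LEMMAS AND PROOFS =====

-- loop characterization: from index s onward, the loop returns the right-shift
-- answer iff the (unique possible) right index m-n is still ahead and matches,
-- else the left-shift answer iff index n-1 matches, else [].
theorem sscGoA_spec (h : Int) (t arr2 : List Int) (d : Nat) :
    ∀ (s : Nat), s + d = t.length + 1 → t.length + 1 ≤ arr2.length →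
    sscGoA (h :: t) arr2 (PySem.List.pyRange s (t.length + 1) 1) =
      (if s ≤ arr2.length - (t.length + 1) ∧ arr2.length - (t.length + 1) < t.length + 1 ∧
          t.getLastD h = arr2.getD (arr2.length - (t.length + 1)) 0 ∧
          (h :: t).dropLast = arr2.drop (arr2.length - (t.length + 1) + 1) then
        [[t.getLastD h], (h :: t).dropLast]
      else if s < t.length + 1 ∧ h = arr2.getD t.length 0 ∧ t = arr2.take t.length then
        [[arr2.getD t.length 0], t]
      else []) := by
  induction d with
  | zero =>
    intro s hs hm
    rw [PySem.List.pyRange_one_eq_nil (by omega)]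
    simp only [sscGoA]
    split_ifs with h1 h2
    · obtain ⟨a, b, -⟩ := h1; omega
    · obtain ⟨a, -⟩ := h2; omega
    · rfl
  | succ d ih =>
    intro s hs hm
    have hsn : s < t.length + 1 := by omega
    have hc1 : ((s : Int) + 1) = ((s + 1 : Nat) : Int) := by push_cast; ring
    rw [PySem.List.pyRange_one_cons (by omega)]
    simp only [sscGoA]
    rw [hc1, PySem.List.pyGetD_neg_one (h :: t) 0 (by simp),
        List.getLast_eq_getLastD (a := h) (l := t),
        PySem.List.pyGetD_zero_cons,
        PySem.List.slice_to_neg_one, PySem.List.slice_from_natCast,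
        PySem.List.slice_from_one, PySem.List.slice_to_natCast,
        PySem.List.pyGetD_natCast, List.tail_cons,
        ih (s + 1) (by omega) hm]
    by_cases hcR : t.getLastD h = arr2.getD s 0 ∧ (h :: t).dropLast = arr2.drop (s + 1)
    · -- the right-shift check fires at this index, so s = m - n
      have hlen : t.length = arr2.length - (s + 1) := by
        have := congrArg List.length hcR.2
        simpa using this
      have hmn : arr2.length - (t.length + 1) = s := by omega
      rw [if_pos hcR, if_pos (by rw [hmn]; exact ⟨le_refl s, hsn, hcR.1, hcR.2⟩)]
    · rw [if_neg hcR]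
      by_cases hcL : h = arr2.getD s 0 ∧ t = arr2.take s
      · -- the left-shift check fires at this index, so s = n - 1
        have hst : t.length = s := by
          have := congrArg List.length hcL.2
          simp at this; omega
        have hR : ¬ (s ≤ arr2.length - (t.length + 1) ∧ arr2.length - (t.length + 1) < t.length + 1 ∧
            t.getLastD h = arr2.getD (arr2.length - (t.length + 1)) 0 ∧
            (h :: t).dropLast = arr2.drop (arr2.length - (t.length + 1) + 1)) := by
          rintro ⟨h1, h2, h3, h4⟩
          have heq : arr2.length - (t.length + 1) = s := by omega
          rw [heq] at h3 h4
          exact hcR ⟨h3, h4⟩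
        rw [if_pos hcL, if_neg hR, if_pos (show s < t.length + 1 ∧ h = arr2.getD t.length 0 ∧ t = arr2.take t.length from ⟨hsn, hst ▸ hcL.1, hst ▸ hcL.2⟩), hst]
      · rw [if_neg hcL]
        -- neither fires here: the result from s+1 equals the result from s
        by_cases k1 : s + 1 ≤ arr2.length - (t.length + 1) ∧
            arr2.length - (t.length + 1) < t.length + 1 ∧
            t.getLastD h = arr2.getD (arr2.length - (t.length + 1)) 0 ∧
            (h :: t).dropLast = arr2.drop (arr2.length - (t.length + 1) + 1)
        · have k1s : s ≤ arr2.length - (t.length + 1) ∧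
              arr2.length - (t.length + 1) < t.length + 1 ∧
              t.getLastD h = arr2.getD (arr2.length - (t.length + 1)) 0 ∧
              (h :: t).dropLast = arr2.drop (arr2.length - (t.length + 1) + 1) :=
            ⟨by omega, k1.2.1, k1.2.2.1, k1.2.2.2⟩
          rw [if_pos k1, if_pos k1s]
        · have k1s : ¬ (s ≤ arr2.length - (t.length + 1) ∧
              arr2.length - (t.length + 1) < t.length + 1 ∧
              t.getLastD h = arr2.getD (arr2.length - (t.length + 1)) 0 ∧
              (h :: t).dropLast = arr2.drop (arr2.length - (t.length + 1) + 1)) := by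
            rintro ⟨a1, a2, a3, a4⟩
            rcases (by omega : s + 1 ≤ arr2.length - (t.length + 1) ∨ arr2.length - (t.length + 1) = s) with hlt | heq
            · exact k1 ⟨hlt, a2, a3, a4⟩
            · rw [heq] at a3 a4; exact hcR ⟨a3, a4⟩
          rw [if_neg k1, if_neg k1s]
          by_cases k2 : s + 1 < t.length + 1 ∧ h = arr2.getD t.length 0 ∧ t = arr2.take t.length
          · have k2s : s < t.length + 1 ∧ h = arr2.getD t.length 0 ∧ t = arr2.take t.length :=
              ⟨by omega, k2.2.1, k2.2.2⟩
            rw [if_pos k2, if_pos k2s]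
          · have k2s : ¬ (s < t.length + 1 ∧ h = arr2.getD t.length 0 ∧ t = arr2.take t.length) := by
              rintro ⟨b1, b2, b3⟩
              rcases (by omega : s + 1 < t.length + 1 ∨ t.length = s) with hlt | heq
              · exact k2 ⟨hlt, b2, b3⟩
              · rw [heq] at b2 b3; exact hcL ⟨b2, b3⟩
            rw [if_neg k2, if_neg k2s]

theorem single_cyclic_shift_spec : Claim_equal_single_cyclic_shift := by
  intro arr1 arr2 _ hpre
  unfold Spec_single_cyclic_shift
  cases arr1 with
  | nil =>
    simp [single_cyclic_shift, single_cyclic_shift_alt, sscGoA]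
  | cons h t =>
    have hm : t.length + 1 ≤ arr2.length := by
      rcases hpre with h' | h'
      · exact absurd h' (by simp)
      · simpa using h'
    have hspec := sscGoA_spec h t arr2 (t.length + 1) 0 (by omega) hm
    simp only [Nat.cast_zero] at hspec
    simp only [single_cyclic_shift, List.length_cons, Nat.cast_add, Nat.cast_one]
    rw [hspec]
    simp only [single_cyclic_shift_alt]
    rw [if_neg (show ¬ arr2.length < t.length + 1 by omega)]
    -- bridge B's rotation comparisons to the per-element conditions of the loop spec
    have hkey : arr2.length - (t.length + 1) < arr2.length := by omega
    have hlt : t.length < arr2.length := by omega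
    have hA : arr2.drop (arr2.length - (t.length + 1)) = t.getLastD h :: (h :: t).dropLast ↔
        (t.getLastD h = arr2.getD (arr2.length - (t.length + 1)) 0 ∧
         (h :: t).dropLast = arr2.drop (arr2.length - (t.length + 1) + 1)) := by
      rw [List.drop_eq_getElem_cons hkey, List.cons.injEq,
          List.getD_eq_getElem?_getD, List.getElem?_eq_getElem hkey, Option.getD_some]
      exact and_congr eq_comm eq_comm
    have hB : arr2.take (t.length + 1) = t ++ [h] ↔
        (h = arr2.getD t.length 0 ∧ t = arr2.take t.length) := by
      rw [List.take_add_one, List.getElem?_eq_getElem hlt, Option.toList_some,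
          List.getD_eq_getElem?_getD, List.getElem?_eq_getElem hlt, Option.getD_some]
      constructor
      · intro e
        obtain ⟨e1, e2⟩ := List.append_inj e (by simp; omega)
        injection e2 with e3 _
        exact ⟨e3.symm, e1.symm⟩
      · rintro ⟨e1, e2⟩
        rw [← e1, ← e2]
    by_cases pb : arr2.length - (t.length + 1) < t.length + 1
    · by_cases p : t.getLastD h = arr2.getD (arr2.length - (t.length + 1)) 0 ∧
          (h :: t).dropLast = arr2.drop (arr2.length - (t.length + 1) + 1)
      · have c1 : 0 ≤ arr2.length - (t.length + 1) ∧
            arr2.length - (t.length + 1) < t.length + 1 ∧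
            t.getLastD h = arr2.getD (arr2.length - (t.length + 1)) 0 ∧
            (h :: t).dropLast = arr2.drop (arr2.length - (t.length + 1) + 1) :=
          ⟨Nat.zero_le _, pb, p.1, p.2⟩
        have c1' : 2 * (t.length + 1) > arr2.length ∧
            arr2.drop (arr2.length - (t.length + 1)) = t.getLastD h :: (h :: t).dropLast :=
          ⟨by omega, hA.mpr p⟩
        rw [if_pos c1, if_pos c1']
        rfl
      · have c1 : ¬ (0 ≤ arr2.length - (t.length + 1) ∧
            arr2.length - (t.length + 1) < t.length + 1 ∧
            t.getLastD h = arr2.getD (arr2.length - (t.length + 1)) 0 ∧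
            (h :: t).dropLast = arr2.drop (arr2.length - (t.length + 1) + 1)) := by
          rintro ⟨-, -, a3, a4⟩; exact p ⟨a3, a4⟩
        have c1' : ¬ (2 * (t.length + 1) > arr2.length ∧
            arr2.drop (arr2.length - (t.length + 1)) = t.getLastD h :: (h :: t).dropLast) := by
          rintro ⟨-, e⟩; exact p (hA.mp e)
        rw [if_neg c1, if_neg c1']
        by_cases q : h = arr2.getD t.length 0 ∧ t = arr2.take t.length
        · have c2 : 0 < t.length + 1 ∧ h = arr2.getD t.length 0 ∧ t = arr2.take t.length :=
            ⟨Nat.succ_pos _, q.1, q.2⟩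
          rw [if_pos c2, if_pos (hB.mpr q), q.1]
        · have c2 : ¬ (0 < t.length + 1 ∧ h = arr2.getD t.length 0 ∧ t = arr2.take t.length) := by
            rintro ⟨-, b2, b3⟩; exact q ⟨b2, b3⟩
          rw [if_neg c2, if_neg (fun e => q (hB.mp e))]
    · have c1 : ¬ (0 ≤ arr2.length - (t.length + 1) ∧
          arr2.length - (t.length + 1) < t.length + 1 ∧
          t.getLastD h = arr2.getD (arr2.length - (t.length + 1)) 0 ∧
          (h :: t).dropLast = arr2.drop (arr2.length - (t.length + 1) + 1)) := by
        rintro ⟨-, a2, -⟩; exact pb a2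
      have c1' : ¬ (2 * (t.length + 1) > arr2.length ∧
          arr2.drop (arr2.length - (t.length + 1)) = t.getLastD h :: (h :: t).dropLast) := by
        rintro ⟨a1, -⟩; omega
      rw [if_neg c1, if_neg c1']
      by_cases q : h = arr2.getD t.length 0 ∧ t = arr2.take t.length
      · have c2 : 0 < t.length + 1 ∧ h = arr2.getD t.length 0 ∧ t = arr2.take t.length :=
          ⟨Nat.succ_pos _, q.1, q.2⟩
        rw [if_pos c2, if_pos (hB.mpr q), q.1]
      · have c2 : ¬ (0 < t.length + 1 ∧ h = arr2.getD t.length 0 ∧ t = arr2.take t.length) := by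
          rintro ⟨-, b2, b3⟩; exact q ⟨b2, b3⟩
        rw [if_neg c2, if_neg (fun e => q (hB.mp e))]
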